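-- pv_equiv track=rewrite | github.com/JSchwerberg/goo | goo_new/files/helpers.py | get_next_folders
-- ===== SOURCE A (Python) =====
-- def get_next_folders(path, folder_list):
--
--     # This is the amount of characters to strip from the beginning of each folder
--     strip = len(path)+ 1
--
--     return_list = []
--
--     for folder in folder_list:
--         end_of_path = folder[strip:]
--         split_folder = end_of_path.split('/')
--         subfolder = split_folder[0]
--         if subfolder not in return_list:
--             return_list.append(subfolder)
--     return sorted(return_list)
-- ===== SOURCE B (Python) =====
-- def get_next_folders(path, folder_list):
--     strip = len(path) + 1
--     firsts = [folder[strip:].split('/')[0] for folder in folder_list]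
--     firsts.sort()
--     result = []
--     for name in firsts:
--         if result and result[-1] == name:
--             continue
--         result.append(name)
--     return result
-- ===== Notes on version B (the rewrite author's own statement) =====
-- stated objective: alternative
-- what changed: Replaces A's collect-while-deduplicating loop (membership scan of the accumulated unique list, then a final sort) by mapping every folder to its first sub-component, sorting the whole mapped list once, and collapsing adjacent duplicates in a single linear pass.
import Mathlib
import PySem

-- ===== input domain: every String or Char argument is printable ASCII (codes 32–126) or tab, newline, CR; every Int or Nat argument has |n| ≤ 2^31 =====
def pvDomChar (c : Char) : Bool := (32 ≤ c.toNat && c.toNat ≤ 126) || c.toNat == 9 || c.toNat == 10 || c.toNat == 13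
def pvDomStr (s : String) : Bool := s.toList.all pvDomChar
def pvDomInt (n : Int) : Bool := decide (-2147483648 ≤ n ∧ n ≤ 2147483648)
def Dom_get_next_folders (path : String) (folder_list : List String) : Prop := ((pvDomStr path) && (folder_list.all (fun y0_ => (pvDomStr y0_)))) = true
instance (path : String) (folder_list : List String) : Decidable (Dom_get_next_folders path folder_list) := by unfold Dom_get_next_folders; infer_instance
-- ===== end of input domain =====

-- B maps each folder to its first sub-component, sorts once, and collapses adjacent
-- duplicates in one pass, instead of A's membership-scan dedup followed by a sort.


-- ===== PORT A =====
def get_next_folders (path : String) (folder_list : List String) : List String :=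
  let strip : Int := PySem.Str.len path + 1
  let return_list := folder_list.foldl (fun return_list folder =>
    let end_of_path := PySem.Str.slice folder (some strip) none
    -- split('/'): sep is "/" ≠ "", so split? is always `some`; its result is never empty,
    -- so `[0]` always exists — the getD/headD defaults are unreachable
    let split_folder := (PySem.Str.split? end_of_path "/").getD []
    let subfolder := split_folder.headD ""
    if subfolder ∈ return_list then return_list else return_list ++ [subfolder]) []
  PySem.List.sorted return_list (fun x => x) false

-- ===== PORT B =====
def get_next_folders_alt (path : String) (folder_list : List String) : List String :=
  let strip : Int := PySem.Str.len path + 1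
  let firsts := folder_list.map (fun folder =>
    ((PySem.Str.split? (PySem.Str.slice folder (some strip) none) "/").getD []).headD "")
  let sortedFirsts := PySem.List.sorted firsts (fun x => x) false
  sortedFirsts.foldl (fun result name =>
    if result.getLast? = some name then result else result ++ [name]) []

-- ===== PRECONDITION & SPEC =====
def Spec_get_next_folders (path : String) (folder_list : List String) (out : List String) : Prop := out = get_next_folders_alt path folder_list
instance (path : String) (folder_list : List String) (out : List String) : Decidable (Spec_get_next_folders path folder_list out) := by unfold Spec_get_next_folders; infer_instance

-- ===== CLAIM (what is proved, stated in full; the proofs are below) =====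
def Claim_equal_get_next_folders : Prop := ∀ (path : String) (folder_list : List String), Dom_get_next_folders path folder_list → Spec_get_next_folders path folder_list (get_next_folders path folder_list)

-- ===== LEMMAS AND PROOFS =====

-- A's loop is exactly set-of-list construction on the mapped elements.
theorem pvFoldMem_eq_ofList_map (f : String → String) (l : List String) :
    l.foldl (fun rl x => if f x ∈ rl then rl else rl ++ [f x]) [] =
      PySem.Set.ofList (l.map f) := by
  have h : ∀ (s : PySem.Set String),
      l.foldl (fun rl x => if f x ∈ rl then rl else rl ++ [f x]) s =
        l.foldl (fun s x => PySem.Set.add s (f x)) s := by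
    intro s
    induction l generalizing s with
    | nil => rfl
    | cons x t ih => simp only [List.foldl_cons, PySem.Set.add_eq_ite, ih]
  rw [h, ← PySem.Set.update_map_eq_foldl_add, PySem.Set.update_nil_left]

-- every member of a strictly increasing list is ≤ its last element
theorem pvLe_getLast_of_pairwise_lt {l : List String} {z a : String}
    (hp : l.Pairwise (· < ·)) (hz : l.getLast? = some z) (ha : a ∈ l) : a ≤ z := by
  rcases List.getLast?_eq_some_iff.mp hz with ⟨ys, rfl⟩
  rcases List.mem_append.mp ha with h | h
  · exact le_of_lt ((List.pairwise_append.mp hp).2.2 a h z (List.mem_singleton_self z))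
  · exact le_of_eq (List.mem_singleton.mp h)

-- invariant of B's adjacent-dedup fold over a nondecreasing list
theorem pvUniq_invariant (l : List String) :
    ∀ (acc : List String), acc.Pairwise (· < ·) →
      (∀ a ∈ acc, ∀ b ∈ l, a ≤ b) → l.Pairwise (· ≤ ·) →
      (l.foldl (fun result name =>
          if result.getLast? = some name then result else result ++ [name]) acc).Pairwise (· < ·) ∧
      (∀ y, y ∈ l.foldl (fun result name =>
          if result.getLast? = some name then result else result ++ [name]) acc ↔
        y ∈ acc ∨ y ∈ l) := by
  induction l with
  | nil => intro acc h1 _ _; exact ⟨h1, fun y => by simp⟩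
  | cons x t ih =>
    intro acc h1 h2 h3
    simp only [List.foldl_cons]
    by_cases hx : acc.getLast? = some x
    · rw [if_pos hx]
      have hxm : x ∈ acc := by
        rcases List.getLast?_eq_some_iff.mp hx with ⟨ys, rfl⟩; simp
      obtain ⟨ha, hb⟩ := ih acc h1
        (fun a ha b hb => h2 a ha b (List.mem_cons_of_mem x hb))
        (List.Pairwise.sublist (List.sublist_cons_self x t) h3)
      refine ⟨ha, fun y => ?_⟩
      rw [hb y]
      constructor
      · rintro (h | h)
        · exact Or.inl h
        · exact Or.inr (List.mem_cons_of_mem x h)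
      · rintro (h | h)
        · exact Or.inl h
        · rcases List.mem_cons.mp h with rfl | h
          · exact Or.inl hxm
          · exact Or.inr h
    · rw [if_neg hx]
      have hlt : ∀ a ∈ acc, a < x := by
        intro a ha
        have hle : a ≤ x := h2 a ha x (List.mem_cons_self)
        rcases lt_or_eq_of_le hle with h | rfl
        · exact h
        · exfalso
          rcases List.getLast?_eq_none_iff.mp.mt (fun hn => (List.eq_nil_iff_forall_not_mem.mp hn a ha)) with _
          cases hz : acc.getLast? with
          | none => exact (List.eq_nil_iff_forall_not_mem.mp (List.getLast?_eq_none_iff.mp hz) a ha)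
          | some z =>
            have h1' : a ≤ z := pvLe_getLast_of_pairwise_lt h1 hz ha
            have h2' : z ≤ a := h2 z (by rcases List.getLast?_eq_some_iff.mp hz with ⟨ys, rfl⟩; simp) a List.mem_cons_self
            exact hx (le_antisymm h2' h1' ▸ hz)
      have h1' : (acc ++ [x]).Pairwise (· < ·) := by
        rw [List.pairwise_append]
        exact ⟨h1, List.pairwise_singleton _ _, fun a ha b hb => (List.mem_singleton.mp hb) ▸ hlt a ha⟩
      have h2' : ∀ a ∈ acc ++ [x], ∀ b ∈ t, a ≤ b := by
        intro a ha b hb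
        rcases List.mem_append.mp ha with h | h
        · exact h2 a h b (List.mem_cons_of_mem x hb)
        · exact (List.mem_singleton.mp h) ▸ (List.pairwise_cons.mp h3).1 b hb
      obtain ⟨ha, hb⟩ := ih (acc ++ [x]) h1' h2' (List.pairwise_cons.mp h3).2
      refine ⟨ha, fun y => ?_⟩
      rw [hb y]
      simp only [List.mem_append, List.mem_cons]
      tauto

-- ===== VERDICT (by name: the statement is the Claim_ definition above) =====
theorem get_next_folders_spec : Claim_equal_get_next_folders := by
  intro path folder_list _
  unfold Spec_get_next_folders get_next_folders get_next_folders_alt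
  simp only []
  set f : String → String := fun folder =>
    ((PySem.Str.split? (PySem.Str.slice folder (some (PySem.Str.len path + 1)) none) "/").getD []).headD ""
    with hf
  rw [pvFoldMem_eq_ofList_map f folder_list]
  set xs := folder_list.map f with hxs
  obtain ⟨hpw, hmem⟩ := pvUniq_invariant (PySem.List.sorted xs (fun x => x) false) []
    (List.Pairwise.nil) (by simp) (PySem.List.sorted_pairwise xs (fun x => x))
  refine PySem.List.sorted_eq_of_perm_of_pairwise_lt _ _ (fun x => x) ?_ hpw
  rw [List.perm_ext_iff_of_nodup (hpw.imp (fun h => ne_of_lt h)) (PySem.Set.nodup_ofList xs)]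
  intro a
  rw [hmem a, PySem.Set.mem_ofList]
  simp [PySem.List.mem_sorted]
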